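-- pv_equiv track=rewrite | github.com/mcca1105/maas-hub | .squads/direct-response-marketing/direct-response-marketing/scripts/drm-cohesion-validator.py | order_assets
-- ===== SOURCE A (Python) =====
-- FUNNEL_ORDER = ["ad", "squeeze", "landing", "advertorial", "vsl", "sales", "email", "upsell", "followup"]
--
-- def order_assets(assets: dict) -> dict:
--     """Order assets by typical funnel sequence."""
--     ordered = {}
--     for key in FUNNEL_ORDER:
--         for asset_name in assets:
--             if key in asset_name.lower() and asset_name not in ordered:
--                 ordered[asset_name] = assets[asset_name]
--     # Add any remaining assets
--     for asset_name, text in assets.items():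
--         if asset_name not in ordered:
--             ordered[asset_name] = text
--     return ordered
-- ===== SOURCE B (Python) =====
-- FUNNEL_ORDER = ["ad", "squeeze", "landing", "advertorial", "vsl", "sales", "email", "upsell", "followup"]
--
-- def _rank(name):
--     low = name.lower()
--     for i, key in enumerate(FUNNEL_ORDER):
--         if key in low:
--             return i
--     return len(FUNNEL_ORDER)
--
-- def order_assets(assets: dict) -> dict:
--     """Order assets by typical funnel sequence (single bucket pass)."""
--     n = len(FUNNEL_ORDER)
--     buckets = [[] for _ in range(n + 1)]
--     for name, text in assets.items():
--         buckets[_rank(name)].append((name, text))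
--     return dict(pair for bucket in buckets for pair in bucket)
-- ===== Notes on version B (the rewrite author's own statement) =====
-- stated objective: simpler
-- what changed: Replaces A's nested scan (for each funnel keyword, rescan all assets with a seen-dict membership test, then a third pass for leftovers) by one pass that computes each asset's funnel rank once and appends it to the matching bucket, then concatenates the buckets.
import Mathlib
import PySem

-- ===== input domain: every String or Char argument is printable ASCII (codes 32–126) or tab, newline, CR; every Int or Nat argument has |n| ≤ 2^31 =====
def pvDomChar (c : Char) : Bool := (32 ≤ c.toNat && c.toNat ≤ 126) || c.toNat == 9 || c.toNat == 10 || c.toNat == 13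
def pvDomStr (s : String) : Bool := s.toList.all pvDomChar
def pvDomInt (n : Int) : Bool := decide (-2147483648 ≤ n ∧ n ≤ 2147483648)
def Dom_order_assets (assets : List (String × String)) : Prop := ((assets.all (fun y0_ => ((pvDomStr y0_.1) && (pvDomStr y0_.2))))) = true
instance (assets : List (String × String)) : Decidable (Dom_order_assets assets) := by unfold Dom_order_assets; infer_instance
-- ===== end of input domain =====

-- B replaces A's nested key×asset rescans with one bucket pass per asset (same result, a plainer single-pass shape).

-- ===== PORT A =====
def FUNNEL_ORDER : List String :=
  ["ad", "squeeze", "landing", "advertorial", "vsl", "sales", "email", "upsell", "followup"]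

def order_assets (assets : List (String × String)) : List (String × String) :=
  -- ordered = {}; for key in FUNNEL_ORDER: for asset_name in assets: ...
  let d : PySem.Dict String String := PySem.Dict.mk assets
  let ordered : PySem.Dict String String :=
    FUNNEL_ORDER.foldl (fun ordered key =>
      assets.foldl (fun o p =>
        if PySem.Str.isIn key (PySem.Str.lower p.1) && !(o.contains p.1) then
          -- assets[asset_name]: asset_name is a key of assets, so the lookup cannot raise; getD's default is never used
          o.insert p.1 (d.getD p.1 "")
        else o) ordered) PySem.Dict.empty
  let ordered2 : PySem.Dict String String :=
    assets.foldl (fun o p =>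
      if !(o.contains p.1) then o.insert p.1 p.2 else o) ordered
  ordered2.items

-- ===== PORT B =====
def pvRank (name : String) : Nat :=
  match FUNNEL_ORDER.findIdx? (fun key => PySem.Str.isIn key (PySem.Str.lower name)) with
  | some i => i
  | none => FUNNEL_ORDER.length

def order_assets_alt (assets : List (String × String)) : List (String × String) :=
  let buckets : List (List (String × String)) :=
    assets.foldl (fun bs p => bs.set (pvRank p.1) (bs.getD (pvRank p.1) [] ++ [p]))
      (List.replicate (FUNNEL_ORDER.length + 1) [])
  buckets.flatten

-- ===== PRECONDITION & SPEC =====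
-- Pre_ excludes association lists with duplicate keys: those do not represent a Python dict (A's parameter type), so no behaviour of A is specified on them.
def Pre_order_assets (assets : List (String × String)) : Prop := (assets.map Prod.fst).Nodup
instance (assets : List (String × String)) : Decidable (Pre_order_assets assets) := by
  unfold Pre_order_assets; infer_instance

def pvWitness_order_assets : (List (String × String)) :=
  [("facebook ad", "a"), ("Landing page", "b"), ("quiz", "c")]

def Spec_order_assets (assets : List (String × String)) (out : List (String × String)) : Prop := out = order_assets_alt assets
instance (assets : List (String × String)) (out : List (String × String)) : Decidable (Spec_order_assets assets out) := by unfold Spec_order_assets; infer_instance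

-- ===== CLAIM (what is proved, stated in full; the proofs are below) =====
def Claim_equal_order_assets : Prop := ∀ (assets : List (String × String)), Dom_order_assets assets → Pre_order_assets assets → Spec_order_assets assets (order_assets assets)

-- ===== LEMMAS AND PROOFS =====

-- canonical form both ports are reduced to: assets bucketed by funnel rank, stable within a bucket
def pvCanon (assets : List (String × String)) (k : Nat) : List (String × String) :=
  (List.range k).flatMap (fun i => assets.filter (fun p => pvRank p.1 == i))

theorem pvRank_le (n : String) : pvRank n ≤ 9 := by
  cases h : FUNNEL_ORDER.findIdx? (fun key => PySem.Str.isIn key (PySem.Str.lower n)) with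
  | none =>
    have hr : pvRank n = FUNNEL_ORDER.length := by unfold pvRank; rw [h]
    rw [hr]; decide
  | some i =>
    have hr : pvRank n = i := by unfold pvRank; rw [h]
    obtain ⟨hi, -, -⟩ := (List.findIdx?_eq_some_iff_getElem).1 h
    simp only [FUNNEL_ORDER, List.length_cons, List.length_nil] at hi
    omega

theorem pvRank_eq_iff (n : String) (k : Nat) (key : String)
    (hkey : FUNNEL_ORDER[k]? = some key) :
    (PySem.Str.isIn key (PySem.Str.lower n) = true ∧ ¬ pvRank n < k) ↔ pvRank n = k := by
  have hklen : k < FUNNEL_ORDER.length := (List.getElem?_eq_some_iff.1 hkey).1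
  have hkeyeq : FUNNEL_ORDER[k]'hklen = key := (List.getElem?_eq_some_iff.1 hkey).2
  cases h : FUNNEL_ORDER.findIdx? (fun key => PySem.Str.isIn key (PySem.Str.lower n)) with
  | none =>
    have hr : pvRank n = FUNNEL_ORDER.length := by unfold pvRank; rw [h]
    have hfalse : PySem.Str.isIn key (PySem.Str.lower n) = false := by
      have := List.findIdx?_eq_none_iff.1 h key (by rw [← hkeyeq]; exact List.getElem_mem hklen)
      simpa using this
    rw [hr]; constructor
    · rintro ⟨h1, -⟩; rw [h1] at hfalse; cases hfalse
    · intro h9; omega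
  | some i =>
    have hr : pvRank n = i := by unfold pvRank; rw [h]
    obtain ⟨hi, hpi, hmin⟩ := (List.findIdx?_eq_some_iff_getElem).1 h
    rw [hr]; constructor
    · rintro ⟨h1, h2⟩
      by_contra hne
      have hki : k < i := by omega
      have hmk := hmin k hki
      rw [hkeyeq, h1] at hmk
      exact hmk rfl
    · intro hik; subst hik; rw [hkeyeq] at hpi; exact ⟨hpi, Nat.lt_irrefl _⟩

theorem pvKeyInj (assets : List (String × String))
    (hnd : (assets.map Prod.fst).Nodup) :
    ∀ p ∈ assets, ∀ q ∈ assets, p.1 = q.1 → p = q := by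
  induction assets with
  | nil => intro p hp; cases hp
  | cons a tl ih =>
    simp only [List.map_cons, List.nodup_cons] at hnd
    intro p hp q hq hpq
    rcases List.mem_cons.1 hp with hp | hp <;> rcases List.mem_cons.1 hq with hq | hq
    · rw [hp, hq]
    · exfalso; exact hnd.1 (by rw [hp] at hpq; rw [hpq]; exact List.mem_map_of_mem hq)
    · exfalso; exact hnd.1 (by rw [hq] at hpq; rw [← hpq]; exact List.mem_map_of_mem hp)
    · exact ih hnd.2 p hp q hq hpq

theorem pvGetDSelf (assets : List (String × String))
    (hnd : (assets.map Prod.fst).Nodup) :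
    ∀ p ∈ assets, (PySem.Dict.mk assets).getD p.1 "" = p.2 := by
  intro p hp
  exact PySem.Dict.getD_of_mem_items (d := PySem.Dict.mk assets) (k := p.1) (v := p.2)
    (by simpa using hp) (by simpa [PySem.Dict.keys] using hnd) ""

theorem pvMemCanonKeys (assets : List (String × String))
    (hnd : (assets.map Prod.fst).Nodup) (k : Nat) :
    ∀ p ∈ assets, (p.1 ∈ (pvCanon assets k).map Prod.fst ↔ pvRank p.1 < k) := by
  intro p hp
  simp only [pvCanon, List.mem_map, List.mem_flatMap, List.mem_range, List.mem_filter,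
    beq_iff_eq]
  constructor
  · rintro ⟨q, ⟨i, hik, hq, hrq⟩, hq1⟩
    have := pvKeyInj assets hnd q hq p hp hq1
    rw [← this]; omega
  · intro hlt; exact ⟨p, ⟨pvRank p.1, hlt, hp, rfl⟩, rfl⟩

theorem pvContainsIff (O : PySem.Dict String String) (x : String) :
    O.contains x = true ↔ x ∈ O.items.map Prod.fst := by
  rw [PySem.Dict.contains_eq_decide_mem_keys]
  simp [PySem.Dict.keys]

theorem innerA (assets : List (String × String)) (key : String) (k : Nat)
    (hc : ∀ n, (PySem.Str.isIn key (PySem.Str.lower n) = true ∧ ¬ pvRank n < k) ↔ pvRank n = k) :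
    ∀ (l : List (String × String)) (O : PySem.Dict String String),
    (l.map Prod.fst).Nodup →
    (∀ p ∈ l, (PySem.Dict.mk assets).getD p.1 "" = p.2) →
    (∀ p ∈ l, (p.1 ∈ O.items.map Prod.fst ↔ pvRank p.1 < k)) →
    (l.foldl (fun o p =>
        if PySem.Str.isIn key (PySem.Str.lower p.1) && !(o.contains p.1) then
          o.insert p.1 ((PySem.Dict.mk assets).getD p.1 "") else o) O)
      = PySem.Dict.mk (O.items ++ l.filter (fun p => pvRank p.1 == k)) := by
  intro l
  induction l with
  | nil => intro O _ _ _; simp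
  | cons p tl ih =>
    intro O hnd hget hm
    simp only [List.map_cons, List.nodup_cons] at hnd
    have hp1 : p.1 ∈ O.items.map Prod.fst ↔ pvRank p.1 < k := hm p (.head _)
    by_cases hrk : pvRank p.1 = k
    · -- p is appended
      have hnc : O.contains p.1 = false := by
        rw [Bool.eq_false_iff, Ne, pvContainsIff, hp1]; omega
      have hisin : PySem.Str.isIn key (PySem.Str.lower p.1) = true := ((hc p.1).2 hrk).1
      have hgp : (PySem.Dict.mk assets).getD p.1 "" = p.2 := hget p (.head _)
      simp only [List.foldl_cons, hisin, hnc, Bool.not_false, Bool.and_true, if_true]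
      have hins : O.insert p.1 ((PySem.Dict.mk assets).getD p.1 "") = PySem.Dict.mk (O.items ++ [p]) := by
        apply PySem.Dict.ext
        rw [PySem.Dict.items_insert_of_not_contains _ _ hnc, hgp]
      rw [hins, ih (PySem.Dict.mk (O.items ++ [p])) hnd.2
            (fun q hq => hget q (.tail _ hq))
            (fun q hq => by
              have hqne : q.1 ≠ p.1 := by
                intro he; exact hnd.1 (he ▸ List.mem_map_of_mem hq)
              rw [List.map_append, List.mem_append]
              simp only [List.map_cons, List.map_nil, List.mem_singleton]
              constructor
              · rintro (h | h)
                · exact (hm q (.tail _ hq)).1 h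
                · exact absurd (by simpa using h) hqne
              · intro h; exact Or.inl ((hm q (.tail _ hq)).2 h))]
      simp [hrk, List.append_assoc]
    · -- p is skipped
      have hcond : (PySem.Str.isIn key (PySem.Str.lower p.1) && !(O.contains p.1)) = false := by
        by_contra hne
        rw [Bool.not_eq_false, Bool.and_eq_true, Bool.not_eq_true'] at hne
        exact hrk ((hc p.1).1 ⟨hne.1, by rw [← hp1, ← pvContainsIff]; simp [hne.2]⟩)
      simp only [List.foldl_cons, hcond, if_false, Bool.false_eq_true]
      rw [ih O hnd.2 (fun q hq => hget q (.tail _ hq)) (fun q hq => hm q (.tail _ hq))]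
      simp [hrk]

theorem finalA :
    ∀ (l : List (String × String)) (O : PySem.Dict String String),
    (l.map Prod.fst).Nodup →
    (∀ p ∈ l, (p.1 ∈ O.items.map Prod.fst ↔ pvRank p.1 < 9)) →
    (l.foldl (fun o p => if !(o.contains p.1) then o.insert p.1 p.2 else o) O)
      = PySem.Dict.mk (O.items ++ l.filter (fun p => pvRank p.1 == 9)) := by
  intro l
  induction l with
  | nil => intro O _ _; simp
  | cons p tl ih =>
    intro O hnd hm
    simp only [List.map_cons, List.nodup_cons] at hnd
    have hp1 := hm p (.head _)
    have hle := pvRank_le p.1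
    by_cases hrk : pvRank p.1 = 9
    · have hnc : O.contains p.1 = false := by
        rw [Bool.eq_false_iff, Ne, pvContainsIff, hp1]; omega
      simp only [List.foldl_cons, hnc, Bool.not_false, if_true]
      have hins : O.insert p.1 p.2 = PySem.Dict.mk (O.items ++ [p]) := by
        apply PySem.Dict.ext
        rw [PySem.Dict.items_insert_of_not_contains _ _ hnc]
      rw [hins, ih (PySem.Dict.mk (O.items ++ [p])) hnd.2
            (fun q hq => by
              have hqne : q.1 ≠ p.1 := by
                intro he; exact hnd.1 (he ▸ List.mem_map_of_mem hq)
              rw [List.map_append, List.mem_append]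
              simp only [List.map_cons, List.map_nil, List.mem_singleton]
              constructor
              · rintro (h | h)
                · exact (hm q (.tail _ hq)).1 h
                · exact absurd (by simpa using h) hqne
              · intro h; exact Or.inl ((hm q (.tail _ hq)).2 h))]
      simp [hrk, List.append_assoc]
    · have hc : O.contains p.1 = true := by rw [pvContainsIff, hp1]; omega
      simp only [List.foldl_cons, hc, Bool.not_true, if_false, Bool.false_eq_true]
      rw [ih O hnd.2 (fun q hq => hm q (.tail _ hq))]
      simp [hrk]

theorem pvCanon_succ (assets : List (String × String)) (k : Nat) :
    pvCanon assets (k + 1) = pvCanon assets k ++ assets.filter (fun p => pvRank p.1 == k) := by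
  simp [pvCanon, List.range_succ]

theorem stepA (assets : List (String × String)) (hnd : (assets.map Prod.fst).Nodup)
    (k : Nat) (key : String) (hkey : FUNNEL_ORDER[k]? = some key) :
    (assets.foldl (fun o p =>
        if PySem.Str.isIn key (PySem.Str.lower p.1) && !(o.contains p.1) then
          o.insert p.1 ((PySem.Dict.mk assets).getD p.1 "") else o)
        (PySem.Dict.mk (pvCanon assets k)))
      = PySem.Dict.mk (pvCanon assets (k + 1)) := by
  rw [innerA assets key k (fun n => pvRank_eq_iff n k key hkey) assets
        (PySem.Dict.mk (pvCanon assets k)) hnd (pvGetDSelf assets hnd)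
        (fun p hp => by simpa using pvMemCanonKeys assets hnd k p hp),
      pvCanon_succ]

theorem A_eq (assets : List (String × String)) (hnd : (assets.map Prod.fst).Nodup) :
    order_assets assets = pvCanon assets 10 := by
  unfold order_assets
  simp only [FUNNEL_ORDER, List.foldl_cons, List.foldl_nil]
  rw [show (PySem.Dict.empty : PySem.Dict String String) = PySem.Dict.mk (pvCanon assets 0) from rfl,
      stepA assets hnd 0 "ad" rfl,
      stepA assets hnd 1 "squeeze" rfl,
      stepA assets hnd 2 "landing" rfl,
      stepA assets hnd 3 "advertorial" rfl,
      stepA assets hnd 4 "vsl" rfl,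
      stepA assets hnd 5 "sales" rfl,
      stepA assets hnd 6 "email" rfl,
      stepA assets hnd 7 "upsell" rfl,
      stepA assets hnd 8 "followup" rfl,
      finalA assets (PySem.Dict.mk (pvCanon assets 9)) hnd
        (fun p hp => by simpa using pvMemCanonKeys assets hnd 9 p hp)]
  rw [show (PySem.Dict.mk (pvCanon assets 9 ++ assets.filter (fun p => pvRank p.1 == 9))).items
        = pvCanon assets 9 ++ assets.filter (fun p => pvRank p.1 == 9) from rfl,
      ← pvCanon_succ]

theorem bucketsB :
    ∀ (l : List (String × String)) (g : Nat → List (String × String)),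
    l.foldl (fun bs p => bs.set (pvRank p.1) (bs.getD (pvRank p.1) [] ++ [p]))
        ((List.range 10).map g)
      = (List.range 10).map (fun i => g i ++ l.filter (fun p => pvRank p.1 == i)) := by
  intro l
  induction l with
  | nil => intro g; simp
  | cons p tl ih =>
    intro g
    have hr : pvRank p.1 < 10 := by have := pvRank_le p.1; omega
    have hgetD : ((List.range 10).map g).getD (pvRank p.1) [] = g (pvRank p.1) := by
      rw [List.getD_eq_getElem?_getD]
      simp [hr]
    have hset : ((List.range 10).map g).set (pvRank p.1) (g (pvRank p.1) ++ [p])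
        = (List.range 10).map (fun i => if i = pvRank p.1 then g (pvRank p.1) ++ [p] else g i) := by
      apply List.ext_getElem
      · simp
      · intro j hj hj'
        simp only [List.length_set, List.length_map, List.length_range] at hj
        rw [List.getElem_set]
        simp only [List.getElem_map, List.getElem_range]
        split_ifs with h1 h2 h3 <;> first | rfl | omega
    simp only [List.foldl_cons, hgetD, hset, ih]
    apply List.map_congr_left
    intro i hi
    by_cases hip : i = pvRank p.1
    · subst hip
      simp [List.append_assoc]
    · simp [Ne.symm hip, hip]

theorem B_eq (assets : List (String × String)) :
    order_assets_alt assets = pvCanon assets 10 := by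
  unfold order_assets_alt
  rw [show (List.replicate (FUNNEL_ORDER.length + 1) ([] : List (String × String)))
        = (List.range 10).map (fun _ => []) from rfl,
      bucketsB assets (fun _ => [])]
  simp only [List.nil_append]
  rw [pvCanon, List.flatMap_def]

-- ===== VERDICT (by name: the statement is the Claim_ definition above) =====
theorem order_assets_spec : Claim_equal_order_assets := by
  intro assets _ hpre
  unfold Spec_order_assets
  rw [A_eq assets hpre, B_eq assets]
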